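-- pv_equiv track=rewrite | github.com/nawjanimri/uned_fund_programacion | practicas/practica_03.py | NumDiasHastaMes
-- ===== SOURCE A (Python) =====
-- DIASMENSUALES = [31, 28, 31, 30, 31, 30, 31, 31, 30, 31, 30, 31]
--
-- def EsBisiesto(anno):
--
--     if (anno%4==0 and anno%100!=0) or (anno%400==0):
--         return 1
--     else:
--         return 0
--
-- def NumeroBisiestosHasta(anno):
--
--     annos = anno - 1600
--     num_bisiestos = int(annos/4)
--
--     centenas = int(annos/100)
--     num_bisiestos = num_bisiestos-centenas
--
--     cuatrocenas = int(annos/400)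
--     num_bisiestos = num_bisiestos+cuatrocenas
--
--     return num_bisiestos
--
-- def NumDiasMes(mes, anno):
--
--     # En febrero se comprueba si es año bisiesto, para añadir 1 día más
--     if mes==1 and EsBisiesto(anno):
--         return DIASMENSUALES[mes]+1
--     else:
--         return DIASMENSUALES[mes]
--
-- def NumDiasHastaMes(mes, anno):
--
--     num_dias = 0 # Número de días hasta el 1 del mes indicado.
--
--     # Si el año es bisiesto, se suma 1 sólo si el mes es superior a febrero:
--     if EsBisiesto(anno):
--         num_dias = num_dias + NumeroBisiestosHasta(anno) - 1
--     else:
--         num_dias = num_dias + NumeroBisiestosHasta(anno)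
--
--     # Se suman los días de todos los meses de ese año hasta el mes indicado
--     for i in range(0, mes):
--         num_dias += NumDiasMes(i, anno) # Se le suman los días del mes
--
--     return num_dias
-- ===== SOURCE B (Python) =====
-- # Days-to-month via a fixed cumulative prefix table indexed directly, no per-month loop.
-- CUMDIAS = [0, 31, 59, 90, 120, 151, 181, 212, 243, 273, 304, 334, 365]
--
-- def EsBisiesto(anno):
--     if (anno%4==0 and anno%100!=0) or (anno%400==0):
--         return 1
--     else:
--         return 0
--
-- def NumeroBisiestosHasta(anno):
--     annos = anno - 1600
--     num_bisiestos = int(annos/4)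
--     centenas = int(annos/100)
--     num_bisiestos = num_bisiestos-centenas
--     cuatrocenas = int(annos/400)
--     return num_bisiestos+cuatrocenas
--
-- def NumDiasHastaMes(mes, anno):
--     num_dias = NumeroBisiestosHasta(anno) + CUMDIAS[mes]
--     # The leap day of this year itself only counts from March onwards.
--     if mes <= 1 and EsBisiesto(anno):
--         num_dias -= 1
--     return num_dias
-- ===== Notes on version B (the rewrite author's own statement) =====
-- stated objective: simpler
-- what changed: Replaces the per-month summing loop (with its per-month leap check) by a direct index into a fixed cumulative-days prefix table plus one leap-day adjustment for months up to February; Pre_ excludes mes >= 13 (A raises IndexError) and negative mes, which is not a month: A's value there is the accidental leftover of an empty loop and B's direct table index wraps or raises.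
-- outside the precondition, e.g. on NumDiasHastaMes(-1, 2001): A returns 97, B returns 462; on NumDiasHastaMes(-20, 2001): A returns 97, B raises IndexError; on NumDiasHastaMes(13, 2000): A raises IndexError, B raises IndexError
import Mathlib
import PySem

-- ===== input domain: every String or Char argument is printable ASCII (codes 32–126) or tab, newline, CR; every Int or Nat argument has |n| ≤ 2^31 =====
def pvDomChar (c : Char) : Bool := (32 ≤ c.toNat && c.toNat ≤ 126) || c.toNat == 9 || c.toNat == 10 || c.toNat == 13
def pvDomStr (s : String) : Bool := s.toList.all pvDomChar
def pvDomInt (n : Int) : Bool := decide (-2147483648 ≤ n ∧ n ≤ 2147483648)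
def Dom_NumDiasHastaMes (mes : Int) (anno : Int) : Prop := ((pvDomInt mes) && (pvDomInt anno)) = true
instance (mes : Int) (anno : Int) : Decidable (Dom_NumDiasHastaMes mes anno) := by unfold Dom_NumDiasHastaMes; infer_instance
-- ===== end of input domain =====

-- B replaces A's per-month summing loop by a direct index into a fixed cumulative prefix table (simpler).

-- ===== PORT A =====
def DIASMENSUALES : List Int := [31, 28, 31, 30, 31, 30, 31, 31, 30, 31, 30, 31]

def EsBisiesto (anno : Int) : Int :=
  if (anno % 4 == 0 && anno % 100 != 0) || anno % 400 == 0 then 1 else 0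

-- int(x/y) in A truncates toward zero on its exactly-representable domain: Int.tdiv
def NumeroBisiestosHasta (anno : Int) : Int :=
  let annos := anno - 1600
  let num_bisiestos := annos.tdiv 4
  let centenas := annos.tdiv 100
  let num_bisiestos := num_bisiestos - centenas
  let cuatrocenas := annos.tdiv 400
  num_bisiestos + cuatrocenas

def NumDiasMes (mes : Int) (anno : Int) : Int :=
  if mes == 1 && EsBisiesto anno != 0 then (PySem.List.pyGet? DIASMENSUALES mes).getD 0 + 1
  else (PySem.List.pyGet? DIASMENSUALES mes).getD 0

def NumDiasHastaMes (mes : Int) (anno : Int) : Int :=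
  let num_dias : Int := 0
  let num_dias :=
    if EsBisiesto anno != 0 then num_dias + NumeroBisiestosHasta anno - 1
    else num_dias + NumeroBisiestosHasta anno
  (PySem.List.pyRange 0 mes 1).foldl (fun acc i => acc + NumDiasMes i anno) num_dias

-- ===== PORT B =====
def CUMDIAS : List Int := [0, 31, 59, 90, 120, 151, 181, 212, 243, 273, 304, 334, 365]

def NumDiasHastaMes_alt (mes : Int) (anno : Int) : Int :=
  let num_dias := NumeroBisiestosHasta anno + (PySem.List.pyGet? CUMDIAS mes).getD 0
  if mes ≤ 1 ∧ EsBisiesto anno ≠ 0 then num_dias - 1 else num_dias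

-- ===== PRECONDITION & SPEC =====
-- Pre_ excludes mes ≥ 13, where A raises IndexError, and negative mes, which is not a month:
-- A's value there (just the leap-count term, from an empty loop) is an accident of A's loop,
-- while B's direct table index wraps or raises there.
def Pre_NumDiasHastaMes (mes : Int) (anno : Int) : Prop := 0 ≤ mes ∧ mes ≤ 12
instance (mes : Int) (anno : Int) : Decidable (Pre_NumDiasHastaMes mes anno) := by unfold Pre_NumDiasHastaMes; infer_instance
def pvWitness_NumDiasHastaMes : Int × Int := (2, 2024)

def Spec_NumDiasHastaMes (mes : Int) (anno : Int) (out : Int) : Prop := out = NumDiasHastaMes_alt mes anno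
instance (mes : Int) (anno : Int) (out : Int) : Decidable (Spec_NumDiasHastaMes mes anno out) := by unfold Spec_NumDiasHastaMes; infer_instance

-- ===== CLAIM (what is proved, stated in full; the proofs are below) =====
def Claim_equal_NumDiasHastaMes : Prop := ∀ (mes : Int) (anno : Int), Dom_NumDiasHastaMes mes anno → Pre_NumDiasHastaMes mes anno → Spec_NumDiasHastaMes mes anno (NumDiasHastaMes mes anno)

-- ===== LEMMAS AND PROOFS =====

theorem esb01 (anno : Int) : EsBisiesto anno = 0 ∨ EsBisiesto anno = 1 := by
  unfold EsBisiesto; split <;> simp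

theorem ndm_val (anno : Int) (k : Nat) (hk : k ≤ 11) :
    NumDiasMes (k : Int) anno
      = (PySem.List.pyGet? DIASMENSUALES (k : Int)).getD 0
        + (if k = 1 ∧ EsBisiesto anno ≠ 0 then 1 else 0) := by
  unfold NumDiasMes
  by_cases hk1 : k = 1
  · subst hk1
    by_cases hb : EsBisiesto anno ≠ 0 <;> simp [hb]
  · have hne : (k : Int) ≠ 1 := by omega
    simp [hne, hk1]

theorem cum_succ (k : Nat) (hk : k ≤ 11) :
    (PySem.List.pyGet? CUMDIAS ((k : Int) + 1)).getD 0
      = (PySem.List.pyGet? CUMDIAS (k : Int)).getD 0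
        + (PySem.List.pyGet? DIASMENSUALES (k : Int)).getD 0 := by
  interval_cases k <;> decide

theorem loopA (anno s : Int) (k : Nat) (hk : k ≤ 12) :
    ((List.range k).map (fun i : Nat => (0 : Int) + (i : Int))).foldl
        (fun acc i => acc + NumDiasMes i anno) s
      = s + (PySem.List.pyGet? CUMDIAS (k : Int)).getD 0
          + (if 2 ≤ k ∧ EsBisiesto anno ≠ 0 then 1 else 0) := by
  induction k with
  | zero => simp [CUMDIAS, PySem.List.pyGet?, PySem.List.pyIdx?]
  | succ k ih =>
    have hk' : k ≤ 11 := by omega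
    rw [List.range_succ, List.map_append, List.foldl_append, ih (by omega)]
    simp only [List.map_cons, List.map_nil, List.foldl_cons, List.foldl_nil]
    rw [show (0 : Int) + (k : Int) = (k : Int) from by ring, ndm_val anno k hk']
    have hc := cum_succ k hk'
    push_cast
    rw [hc]
    split_ifs <;> omega

-- ===== VERDICT (by name: the statement is the Claim_ definition above) =====
theorem NumDiasHastaMes_spec : Claim_equal_NumDiasHastaMes := by
  intro mes anno _ hpre
  show NumDiasHastaMes mes anno = NumDiasHastaMes_alt mes anno
  obtain ⟨h0, h12⟩ := hpre
  obtain ⟨k, rfl⟩ : ∃ k : Nat, mes = (k : Int) := ⟨mes.toNat, by omega⟩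
  have hk : k ≤ 12 := by omega
  unfold NumDiasHastaMes NumDiasHastaMes_alt
  rw [PySem.List.pyRange_one, show (((k : Int)) - 0).toNat = k from by omega,
      loopA anno _ k hk]
  rcases esb01 anno with hb | hb <;> simp [hb] <;> split_ifs <;> omega
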